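-- pv_equiv track=rewrite | github.com/TheHeadlessSourceMan/dateTools | megaParse.py | findTextCase
-- ===== SOURCE A (Python) =====
-- def findTextCase(s:str)->str:
--     """
--     given a word pair, determine text case
--
--     IMPORTANT it only works if "s" has two words in it
--     """
--     if s[0].isupper():
--         first='u'
--     else:
--         first='l'
--     middle='u'
--     second='l'
--     hasLower=False
--     hasUpper=False
--     for c in s[1:]:
--         if c.isupper():
--             if not hasUpper:
--                 hasUpper=True
--                 second='h'
--                 if hasLower: # failfast
--                     break
--         else:
--             if not hasLower:
--                 hasLower=True
--                 middle='l'
--                 if hasUpper: # failfast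
--                     break
--     return ''.join((first,middle,second,middle))
-- ===== SOURCE B (Python) =====
-- def findTextCase(s:str)->str:
--     """
--     given a word pair, determine text case
--
--     IMPORTANT it only works if "s" has two words in it
--     """
--     first = 'u' if s[0].isupper() else 'l'
--     rest = s[1:]
--     has_upper = any(c.isupper() for c in rest)
--     has_lower = any(not c.isupper() for c in rest)
--     middle = 'l' if has_lower else 'u'
--     second = 'h' if has_upper else 'l'
--     return first + middle + second + middle
-- ===== Notes on version B (the rewrite author's own statement) =====
-- stated objective: simpler
-- what changed: Replaced A's single stateful early-exit loop over four mutable variables (two flags, two result chars, break logic) with two independent any() presence scans of s[1:] from which the result characters are derived directly.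
import Mathlib
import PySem

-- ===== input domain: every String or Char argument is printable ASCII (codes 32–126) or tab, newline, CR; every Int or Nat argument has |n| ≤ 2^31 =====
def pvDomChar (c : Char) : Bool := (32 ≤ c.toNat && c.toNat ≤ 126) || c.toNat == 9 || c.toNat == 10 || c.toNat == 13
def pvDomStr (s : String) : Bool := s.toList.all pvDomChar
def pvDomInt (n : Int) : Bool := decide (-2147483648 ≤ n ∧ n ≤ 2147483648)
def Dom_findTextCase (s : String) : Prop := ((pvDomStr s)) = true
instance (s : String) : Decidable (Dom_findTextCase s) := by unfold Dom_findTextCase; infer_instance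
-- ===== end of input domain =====

-- B replaces A's single stateful early-exit flag loop with two independent any-scans of s[1:]; objective: simpler.
-- ===== PORT A =====
-- A's for-loop over s[1:] with mutable middle/second/hasLower/hasUpper and break
def findTextCaseLoopA : List Char → Char → Char → Bool → Bool → Char × Char
  | [], middle, second, _, _ => (middle, second)
  | c :: rest, middle, second, hasLower, hasUpper =>
    if PySem.Chars.isupper c then
      if hasUpper = false then
        if hasLower then (middle, 'h')  -- failfast break
        else findTextCaseLoopA rest middle 'h' hasLower true
      else findTextCaseLoopA rest middle second hasLower hasUpper
    else
      if hasLower = false then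
        if hasUpper then ('l', second)  -- failfast break
        else findTextCaseLoopA rest 'l' second true hasUpper
      else findTextCaseLoopA rest middle second hasLower hasUpper

def findTextCase (s : String) : String :=
  let cs := s.toList
  -- s[0] raises IndexError on empty s; Pre_ excludes that, so the default is never read
  let first := if PySem.Chars.isupper (PySem.List.pyGetD cs 0 ' ') then 'u' else 'l'
  let r := findTextCaseLoopA (PySem.List.slice cs (some 1) none) 'u' 'l' false false
  String.ofList [first, r.1, r.2, r.1]

-- ===== PORT B =====
def findTextCase_alt (s : String) : String :=
  let cs := s.toList
  let first := if PySem.Chars.isupper (PySem.List.pyGetD cs 0 ' ') then 'u' else 'l'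
  let rest := PySem.List.slice cs (some 1) none
  let hasUpper := rest.any (fun c => PySem.Chars.isupper c)
  let hasLower := rest.any (fun c => !PySem.Chars.isupper c)
  let middle := if hasLower then 'l' else 'u'
  let second := if hasUpper then 'h' else 'l'
  String.ofList [first, middle, second, middle]

-- ===== PRECONDITION & SPEC =====
-- A raises IndexError (s[0]) on the empty string; Pre_ excludes exactly that input.
def Pre_findTextCase (s : String) : Prop := s ≠ ""
instance (s : String) : Decidable (Pre_findTextCase s) := by unfold Pre_findTextCase; infer_instance
def pvWitness_findTextCase : String := "Ab"

def Spec_findTextCase (s : String) (out : String) : Prop := out = findTextCase_alt s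
instance (s : String) (out : String) : Decidable (Spec_findTextCase s out) := by unfold Spec_findTextCase; infer_instance

-- ===== CLAIM =====
def Claim_equal_findTextCase : Prop := ∀ (s : String), Dom_findTextCase s → Pre_findTextCase s → Spec_findTextCase s (findTextCase s)

-- ===== LEMMAS AND PROOFS =====
-- Loop invariant: with flags matching the already-emitted result chars, A's loop computes
-- exactly the two any-scans of B.
lemma loopA_char (rest : List Char) (hl hu : Bool) :
    findTextCaseLoopA rest (if hl then 'l' else 'u') (if hu then 'h' else 'l') hl hu =
      ((if hl || rest.any (fun c => !PySem.Chars.isupper c) then 'l' else 'u'),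
       (if hu || rest.any (fun c => PySem.Chars.isupper c) then 'h' else 'l')) := by
  induction rest generalizing hl hu with
  | nil => simp [findTextCaseLoopA]
  | cons c rest ih =>
    by_cases hc : PySem.Chars.isupper c
    · cases hu
      · cases hl
        · simpa [findTextCaseLoopA, hc] using ih false true
        · simp [findTextCaseLoopA, hc]
      · simpa [findTextCaseLoopA, hc] using ih hl true
    · cases hl
      · cases hu
        · simpa [findTextCaseLoopA, hc] using ih true false
        · simp [findTextCaseLoopA, hc]
      · simpa [findTextCaseLoopA, hc] using ih true hu

-- specialisation of the invariant to the loop's initial state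
lemma loopA_init (rest : List Char) :
    findTextCaseLoopA rest 'u' 'l' false false =
      ((if rest.any (fun c => !PySem.Chars.isupper c) then 'l' else 'u'),
       (if rest.any (fun c => PySem.Chars.isupper c) then 'h' else 'l')) := by
  simpa using loopA_char rest false false

-- ===== VERDICT =====
theorem findTextCase_spec : Claim_equal_findTextCase := by
  intro s _ _
  unfold Spec_findTextCase findTextCase findTextCase_alt
  simp only [loopA_init]
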